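-- pv_equiv track=rewrite | github.com/tupyy/homesite | money/views/index/controller.py | get_month_range
-- ===== SOURCE A (Python) =====
-- def get_month_range(month_index, range_size):
--     """
--     Return a range of month representing the last range_size month of month_index
--     :param month_index month from which we count back range_size month
--     :param range_size how many month we go back
--     :return list
--     """
--     month_range = []
--     if range_size < 0 and not 0 < month_index < 13:
--         return month_range
--
--     for i in range(1, range_size):
--         if month_index - i > 0:
--             month_range.append(month_index - i)
--     month_range.append(month_index)
--     return sorted(month_range)
-- ===== SOURCE B (Python) =====
-- def get_month_range(month_index, range_size):
--     """Closed-form: the ascending run of earlier positive months, then month_index."""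
--     if range_size < 0 and not 0 < month_index < 13:
--         return []
--     lo = max(1, month_index - range_size + 1)
--     return list(range(lo, month_index)) + [month_index]
-- ===== Notes on version B (the rewrite author's own statement) =====
-- stated objective: simpler
-- what changed: Replaces the filter loop over range(1, range_size) plus sorted() with a single closed-form expression: the ascending run list(range(max(1, month_index - range_size + 1), month_index)) followed by month_index.
import Mathlib
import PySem

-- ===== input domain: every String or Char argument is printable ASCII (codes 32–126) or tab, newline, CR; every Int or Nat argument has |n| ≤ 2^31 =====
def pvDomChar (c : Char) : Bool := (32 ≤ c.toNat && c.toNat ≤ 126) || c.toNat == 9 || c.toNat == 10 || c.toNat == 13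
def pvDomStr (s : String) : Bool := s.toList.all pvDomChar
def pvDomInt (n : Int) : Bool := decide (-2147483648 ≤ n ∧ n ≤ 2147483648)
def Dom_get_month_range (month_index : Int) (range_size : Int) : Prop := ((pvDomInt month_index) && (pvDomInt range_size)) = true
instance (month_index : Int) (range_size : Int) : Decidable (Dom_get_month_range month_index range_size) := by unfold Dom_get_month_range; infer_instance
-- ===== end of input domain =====

-- B replaces A's filter loop + sorted() by a single closed-form ascending range; same guard, same return value.

-- ===== PORT A =====
def get_month_range (month_index : Int) (range_size : Int) : List Int :=
  let month_range : List Int := []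
  if range_size < 0 ∧ ¬ (0 < month_index ∧ month_index < 13) then
    month_range
  else
    let month_range := (PySem.List.pyRange 1 range_size 1).foldl
      (fun acc i => if month_index - i > 0 then acc ++ [month_index - i] else acc) month_range
    let month_range := month_range ++ [month_index]
    PySem.List.sorted month_range (fun x => x) false

-- ===== PORT B =====
def get_month_range_alt (month_index : Int) (range_size : Int) : List Int :=
  if range_size < 0 ∧ ¬ (0 < month_index ∧ month_index < 13) then
    []
  else
    let lo := max 1 (month_index - range_size + 1)
    PySem.List.pyRange lo month_index 1 ++ [month_index]

-- ===== PRECONDITION & SPEC =====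
def Spec_get_month_range (month_index : Int) (range_size : Int) (out : List Int) : Prop := out = get_month_range_alt month_index range_size
instance (month_index : Int) (range_size : Int) (out : List Int) : Decidable (Spec_get_month_range month_index range_size out) := by unfold Spec_get_month_range; infer_instance

-- ===== CLAIM (what is proved, stated in full; the proofs are below) =====
def Claim_equal_get_month_range : Prop := ∀ (month_index : Int) (range_size : Int), Dom_get_month_range month_index range_size → Spec_get_month_range month_index range_size (get_month_range month_index range_size)

-- ===== LEMMAS AND PROOFS =====

-- mapping i ↦ m - i over range(1, n) gives the countdown range(m-1, m-n, -1)
lemma pv_map_sub_pyRange (m n : Int) :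
    (PySem.List.pyRange 1 n 1).map (fun i => m - i)
      = PySem.List.pyRange (m - 1) (m - n) (-1) := by
  rw [PySem.List.pyRange_one, PySem.List.pyRange_neg_one, List.map_map]
  have h1 : (n - 1).toNat = (m - 1 - (m - n)).toNat := by omega
  rw [h1]
  apply List.map_congr_left
  intro k _
  simp
  omega

-- filtering the positives out of range(m-n+1, m) clamps the lower bound to 1
lemma pv_filter_pos_pyRange (m n : Int) :
    (PySem.List.pyRange (m - n + 1) m 1).filter (fun v => 0 < v)
      = PySem.List.pyRange (max 1 (m - n + 1)) m 1 := by
  by_cases h1 : 1 ≤ m - n + 1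
  · rw [max_eq_right h1]
    apply List.filter_eq_self.mpr
    intro x hx
    have := PySem.List.mem_pyRange_one.mp hx
    simp; omega
  · rw [max_eq_left (by omega)]
    by_cases hm : m < 1
    · rw [PySem.List.pyRange_one_eq_nil (by omega : m ≤ 1)]
      apply List.filter_eq_nil_iff.mpr
      intro x hx
      have := PySem.List.mem_pyRange_one.mp hx
      simp; omega
    · rw [PySem.List.pyRange_one_append (m - n + 1) 1 m (by omega) (by omega),
        List.filter_append]
      have hl : (PySem.List.pyRange (m - n + 1) 1).filter (fun v => 0 < v) = [] := by
        apply List.filter_eq_nil_iff.mpr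
        intro x hx
        have := PySem.List.mem_pyRange_one.mp hx
        simp; omega
      have hr : (PySem.List.pyRange 1 m).filter (fun v => 0 < v) = PySem.List.pyRange 1 m := by
        apply List.filter_eq_self.mpr
        intro x hx
        have := PySem.List.mem_pyRange_one.mp hx
        simp; omega
      rw [hl, hr, List.nil_append]

-- ===== VERDICT (by name: the statement is the Claim_ definition above) =====
theorem get_month_range_spec : Claim_equal_get_month_range := by
  intro m rs _
  unfold Spec_get_month_range get_month_range get_month_range_alt
  by_cases h : rs < 0 ∧ ¬ (0 < m ∧ m < 13)
  · simp [h]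
  · simp only [h, if_false]
    have hfun : (fun (acc : List Int) i => if m - i > 0 then acc ++ [m - i] else acc)
        = (fun acc i => if decide (m - i > 0) = true then acc ++ [m - i] else acc) := by
      funext acc i; simp only [decide_eq_true_eq]
    rw [hfun, PySem.List.foldl_append_if (fun i => decide (m - i > 0)) (fun i => m - i)
        (PySem.List.pyRange 1 rs 1) []]
    have hp : (fun i : Int => decide (m - i > 0))
        = ((fun v : Int => decide (0 < v)) ∘ (fun i => m - i)) := rfl
    rw [List.nil_append, hp,
      ← List.filter_map (f := fun i => m - i) (p := fun v => decide (0 < v)),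
      pv_map_sub_pyRange, PySem.List.pyRange_neg_one_eq_reverse]
    rw [show m - 1 + 1 = m by ring]
    rw [List.filter_reverse, pv_filter_pos_pyRange m rs]
    apply PySem.List.sorted_eq_of_perm_of_pairwise_lt
    · exact List.Perm.append_right [m] (List.reverse_perm _).symm
    · rw [List.pairwise_append]
      refine ⟨PySem.List.pairwise_lt_pyRange_one _ _, List.pairwise_singleton _ _, ?_⟩
      intro a ha b hb
      have := PySem.List.mem_pyRange_one.mp ha
      simp at hb
      omega
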